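-- pv_equiv track=rewrite | github.com/aheed/advent-of-code-2021 | adv16_2.py | bin_to_literal
-- ===== SOURCE A (Python) =====
-- def bin_to_int(number: str, length: int) -> int:
--     bits = [int(bit) for bit in number[:length]]
--     res = int(0)
--     for bit in bits:
--         res <<= 1
--         res += bit
--     return res
--
-- def bin_to_literal(l: str) -> tuple[int, int]:
--     nof_nibbles = int(0)
--     bin_literal = ""
--     done = False
--     while not done:
--         bin_literal += l[nof_nibbles * 5 + 1:(nof_nibbles*5) + 5]
--         done = l[nof_nibbles * 5] == "0"
--         nof_nibbles += 1
--
--     length = nof_nibbles * 5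
--
--     return (length, bin_to_int(bin_literal, nof_nibbles * 4))
-- ===== SOURCE B (Python) =====
-- def bin_to_literal(l: str) -> tuple[int, int]:
--     # Single fused pass: no intermediate bit-string, no separate conversion helper.
--     i = 0
--     res = 0
--     while True:
--         stop = l[i] == "0"
--         for c in l[i + 1:i + 5]:
--             res = res * 2 + int(c)
--         i += 5
--         if stop:
--             return (i, res)
-- ===== Notes on version B (the rewrite author's own statement) =====
-- stated objective: simpler
-- what changed: Replaces the build-a-bit-string-then-convert-in-a-second-pass structure (with the bin_to_int helper) by one fused loop that accumulates the integer value nibble by nibble as it reads the input.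
import Mathlib
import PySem

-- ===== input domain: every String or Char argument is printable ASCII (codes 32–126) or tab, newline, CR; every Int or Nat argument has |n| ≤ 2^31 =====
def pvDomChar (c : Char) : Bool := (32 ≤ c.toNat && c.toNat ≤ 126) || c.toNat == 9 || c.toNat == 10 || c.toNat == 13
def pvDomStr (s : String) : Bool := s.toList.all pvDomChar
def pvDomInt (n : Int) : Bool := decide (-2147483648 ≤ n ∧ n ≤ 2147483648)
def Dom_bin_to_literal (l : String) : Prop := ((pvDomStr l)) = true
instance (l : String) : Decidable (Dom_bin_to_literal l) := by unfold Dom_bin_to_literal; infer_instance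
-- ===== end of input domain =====

-- B fuses A's build-a-bit-string pass and its separate bin_to_int conversion pass into one
-- loop with a single integer accumulator (objective: simpler).

-- ===== PORT A =====

-- int(c) for a single printable-ASCII character: its value if it is a digit, ValueError (none) otherwise.
-- (Used by both ports: both Pythons call int on one character.)
def pyIntOfDigit? (c : Char) : Option Int :=
  if c.isDigit then some ((c.toNat : Int) - 48) else none

-- the while-loop of A: state (nof_nibbles, bin_literal); none = IndexError at l[nof_nibbles*5].
-- fuel only makes the recursion structural; chars.length + 1 iterations always suffice.
def binToLiteralLoop (chars : List Char) : Nat → Nat → List Char → Option (Nat × List Char)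
  | 0, _, _ => none
  | fuel + 1, n, acc =>
    let acc' := acc ++ PySem.List.slice chars (some ((n * 5 + 1 : Nat) : Int)) (some ((n * 5 + 5 : Nat) : Int))
    match chars[n * 5]? with
    | none => none
    | some c => if c = '0' then some (n + 1, acc') else binToLiteralLoop chars fuel (n + 1) acc'

-- A's helper bin_to_int: bits = [int(b) for b in number[:length]]; then the shift-accumulate loop.
-- none = ValueError from int() on a non-digit.
def bin_to_int (number : List Char) (length : Int) : Option Int :=
  match (PySem.List.slice number none (some length)).mapM pyIntOfDigit? with
  | none => none
  | some bits => some (bits.foldl (fun r b => r * 2 + b) 0)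

def bin_to_literal (l : String) : Int × Int :=
  match binToLiteralLoop l.toList (l.toList.length + 1) 0 [] with
  | none => (0, 0)   -- Python raises IndexError here; excluded by Pre_
  | some (n, bl) =>
    match bin_to_int bl ((n * 4 : Nat) : Int) with
    | none => (0, 0) -- Python raises ValueError here; excluded by Pre_
    | some v => (((n * 5 : Nat) : Int), v)

-- ===== PORT B =====

-- the inner 'for c in l[i+1:i+5]: res = res*2 + int(c)' of B; none = ValueError
def bNibble (o : Option Int) (cs : List Char) : Option Int :=
  cs.foldl (fun o c => o.bind fun v => (pyIntOfDigit? c).map fun d => v * 2 + d) o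

-- B's single fused while-loop: state (i, res); none = IndexError/ValueError
def binToLiteralAltLoop (chars : List Char) : Nat → Nat → Int → Option (Int × Int)
  | 0, _, _ => none
  | fuel + 1, i, res =>
    match chars[i]? with
    | none => none
    | some c =>
      match bNibble (some res) (PySem.List.slice chars (some ((i + 1 : Nat) : Int)) (some ((i + 5 : Nat) : Int))) with
      | none => none
      | some res' => if c = '0' then some (((i + 5 : Nat) : Int), res') else binToLiteralAltLoop chars fuel (i + 5) res'

def bin_to_literal_alt (l : String) : Int × Int :=
  match binToLiteralAltLoop l.toList (l.toList.length + 1) 0 0 with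
  | none => (0, 0)   -- Python raises here; excluded by Pre_
  | some p => p

-- ===== PRECONDITION & SPEC =====
-- Pre_ = exactly the inputs on which Python A returns: some nibble k has leading character '0'
-- (so the loop stops without running off the end) and every nibble-payload position read is a digit.
def Pre_bin_to_literal (l : String) : Prop :=
  ∃ k, k < l.toList.length ∧ l.toList[k * 5]? = some '0' ∧
    (∀ j, j < k → l.toList[j * 5]? ≠ some '0') ∧
    (∀ p, p < l.toList.length → p < k * 5 + 5 → p % 5 ≠ 0 → (l.toList[p]?.getD ' ').isDigit = true)
instance (l : String) : Decidable (Pre_bin_to_literal l) := by unfold Pre_bin_to_literal; infer_instance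

def pvWitness_bin_to_literal : String := "01010"

def Spec_bin_to_literal (l : String) (out : Int × Int) : Prop := out = bin_to_literal_alt l
instance (l : String) (out : Int × Int) : Decidable (Spec_bin_to_literal l out) := by unfold Spec_bin_to_literal; infer_instance

-- ===== CLAIM (what is proved, stated in full; the proofs are below) =====
def Claim_equal_bin_to_literal : Prop := ∀ (l : String), Dom_bin_to_literal l → Pre_bin_to_literal l → Spec_bin_to_literal l (bin_to_literal l)

-- ===== LEMMAS AND PROOFS =====

theorem bNibble_none (cs : List Char) : bNibble none cs = none := by
  induction cs with
  | nil => rfl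
  | cons c cs ih => simpa [bNibble] using ih

theorem bNibble_append (o : Option Int) (xs ys : List Char) :
    bNibble o (xs ++ ys) = bNibble (bNibble o xs) ys := by
  simp [bNibble, List.foldl_append]

theorem bin_to_int_eq_bNibble (cs : List Char) : ∀ r : Int,
    (match cs.mapM pyIntOfDigit? with
     | none => none
     | some bits => some (bits.foldl (fun a b => a * 2 + b) r)) = bNibble (some r) cs := by
  induction cs with
  | nil => intro r; rfl
  | cons c cs ih =>
    intro r
    rcases h : pyIntOfDigit? c with _ | d
    · simp [List.mapM_cons, h, bNibble]
      exact (bNibble_none cs).symm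
    · have h2 := ih (r * 2 + d)
      rcases hm : List.mapM pyIntOfDigit? cs with _ | bits
      · rw [hm] at h2
        simpa [List.mapM_cons, h, hm, bNibble] using h2
      · rw [hm] at h2
        simpa [List.mapM_cons, h, hm, bNibble] using h2

theorem loop_len (chars : List Char) : ∀ (fuel n : Nat) (acc : List Char) (m : Nat) (bl : List Char),
    binToLiteralLoop chars fuel n acc = some (m, bl) →
    bl.length ≤ acc.length + (m - n) * 4 ∧ n < m := by
  intro fuel
  induction fuel with
  | zero => intro n acc m bl h; simp [binToLiteralLoop] at h
  | succ fuel ih =>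
    intro n acc m bl h
    simp only [binToLiteralLoop] at h
    have hslice : (PySem.List.slice chars (some ((n * 5 + 1 : Nat) : Int)) (some ((n * 5 + 5 : Nat) : Int))).length ≤ 4 := by
      have he : ((n * 5 + 5 : Nat) : Int) = ((n * 5 + 1 : Nat) : Int) + ((4 : Nat) : Int) := by push_cast; ring
      rw [he, PySem.List.slice_natCast_add]
      simpa using List.length_take_le _ _
    rcases hg : chars[n * 5]? with _ | c
    · simp [hg] at h
    · simp only [hg] at h
      by_cases hc : c = '0'
      · subst hc
        rw [if_pos rfl] at h
        simp only [Option.some.injEq, Prod.mk.injEq] at h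
        obtain ⟨hm, hbl⟩ := h
        refine ⟨?_, by omega⟩
        rw [← hbl, List.length_append]
        omega
      · rw [if_neg hc] at h
        obtain ⟨h1, h2⟩ := ih (n + 1) _ m bl h
        rw [List.length_append] at h1
        omega

theorem loop_acc (chars : List Char) : ∀ (fuel n : Nat) (acc : List Char),
    binToLiteralLoop chars fuel n acc =
      (binToLiteralLoop chars fuel n []).map (fun p => (p.1, acc ++ p.2)) := by
  intro fuel
  induction fuel with
  | zero => intro n acc; rfl
  | succ fuel ih =>
    intro n acc
    simp only [binToLiteralLoop]
    rcases hg : chars[n * 5]? with _ | c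
    · simp
    · by_cases hc : c = '0'
      · simp [hc]
      · simp only [hc, if_false]
        rw [ih (n + 1) (acc ++ _), ih (n + 1) ([] ++ _)]
        rcases h : binToLiteralLoop chars fuel (n + 1) [] with _ | ⟨m, bl⟩
        · simp
        · simp [List.append_assoc]

theorem main_loop_eq (chars : List Char) : ∀ (fuel n : Nat) (r : Int),
    (match binToLiteralLoop chars fuel n [] with
     | none => ((0 : Int), (0 : Int))
     | some (m, bl) =>
       match bNibble (some r) bl with
       | none => ((0 : Int), (0 : Int))
       | some v => (((m * 5 : Nat) : Int), v))
    = (match binToLiteralAltLoop chars fuel (n * 5) r with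
       | none => ((0 : Int), (0 : Int))
       | some p => p) := by
  intro fuel
  induction fuel with
  | zero => intro n r; rfl
  | succ fuel ih =>
    intro n r
    simp only [binToLiteralLoop, binToLiteralAltLoop]
    rcases hg : chars[n * 5]? with _ | c
    · simp
    · set s := PySem.List.slice chars (some ((n * 5 + 1 : Nat) : Int)) (some ((n * 5 + 5 : Nat) : Int)) with hs
      by_cases hc : c = '0'
      · simp only [hc, if_true, List.nil_append]
        rcases hb : bNibble (some r) s with _ | v
        · simp
        · norm_num [Nat.succ_mul]
      · simp only [hc, if_false]
        rw [loop_acc chars fuel (n + 1) ([] ++ s)]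
        rcases hb : bNibble (some r) s with _ | r'
        · rcases h : binToLiteralLoop chars fuel (n + 1) [] with _ | ⟨m, bl⟩
          · simp
          · simp only [Option.map_some, List.nil_append]
            rw [bNibble_append, hb, bNibble_none]
        · have := ih (n + 1) r'
          rcases h : binToLiteralLoop chars fuel (n + 1) [] with _ | ⟨m, bl⟩
          · simp only [Option.map_none]
            rw [h] at this
            simpa [Nat.succ_mul] using this
          · simp only [Option.map_some, List.nil_append]
            rw [bNibble_append, hb]
            rw [h] at this
            have h55 : (n + 1) * 5 = n * 5 + 5 := by ring
            rw [h55] at this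
            exact this

theorem ports_equal (l : String) : bin_to_literal l = bin_to_literal_alt l := by
  unfold bin_to_literal bin_to_literal_alt
  have hmain := main_loop_eq l.toList (l.toList.length + 1) 0 0
  simp only [Nat.zero_mul] at hmain
  rcases h : binToLiteralLoop l.toList (l.toList.length + 1) 0 [] with _ | ⟨m, bl⟩
  · rw [h] at hmain; exact hmain
  · rw [h] at hmain
    have hlen : bl.length ≤ m * 4 := by
      have := (loop_len l.toList (l.toList.length + 1) 0 [] m bl h).1
      simpa using this
    have hbi : bin_to_int bl ((m * 4 : Nat) : Int) = bNibble (some 0) bl := by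
      unfold bin_to_int
      rw [PySem.List.slice_to_natCast, List.take_of_length_le hlen]
      exact bin_to_int_eq_bNibble bl 0
    have hmain' : (match bNibble (some 0) bl with
        | none => ((0 : Int), (0 : Int))
        | some v => (((m * 5 : Nat) : Int), v))
        = (match binToLiteralAltLoop l.toList (l.toList.length + 1) 0 0 with
        | none => ((0 : Int), (0 : Int))
        | some p => p) := hmain
    show (match bin_to_int bl ((m * 4 : Nat) : Int) with
        | none => ((0 : Int), (0 : Int))
        | some v => (((m * 5 : Nat) : Int), v))
        = (match binToLiteralAltLoop l.toList (l.toList.length + 1) 0 0 with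
        | none => ((0 : Int), (0 : Int))
        | some p => p)
    rw [hbi]
    exact hmain'

-- ===== VERDICT (by name: the statement is the Claim_ definition above) =====
theorem bin_to_literal_spec : Claim_equal_bin_to_literal := by
  intro l _ _
  unfold Spec_bin_to_literal
  exact ports_equal l
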